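-- pv_equiv track=rewrite | github.com/silam741852963/web2product-catalog | scripts/extensions/io/load_source.py | _resolve_keys
-- ===== SOURCE A (Python) =====
-- from typing import (
--     Any,
--     Dict,
--     Iterable,
--     Iterator,
--     List,
--     Mapping,
--     Optional,
--     Protocol,
--     Sequence,
--     Set,
--     Tuple,
-- )
--
-- _PRIMARY_ID_KEYS = ("bvdid", "hojin_id", "id")
--
-- _PRIMARY_NAME_KEYS = ("name", "company_name", "company")
--
-- _PRIMARY_URL_KEYS = ("url", "website", "homepage", "home_page")
--
-- def _resolve_keys(fieldnames: Optional[Sequence[str]]) -> Tuple[str, str, str]: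
--     fset = {(fn or "").strip().lower(): fn for fn in (fieldnames or [])}
--
--     def pick(candidates: Sequence[str]) -> str:
--         for c in candidates:
--             if c in fset:
--                 return fset[c]
--         return ""
--
--     return (
--         pick(_PRIMARY_ID_KEYS),
--         pick(_PRIMARY_NAME_KEYS),
--         pick(_PRIMARY_URL_KEYS),
--     )
-- ===== SOURCE B (Python) =====
-- _PRIMARY_ID_KEYS = ("bvdid", "hojin_id", "id")
-- _PRIMARY_NAME_KEYS = ("name", "company_name", "company")
-- _PRIMARY_URL_KEYS = ("url", "website", "homepage", "home_page")
--
-- _CATEGORIES = (_PRIMARY_ID_KEYS, _PRIMARY_NAME_KEYS, _PRIMARY_URL_KEYS)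
--
-- def _resolve_keys(fieldnames):
--     # Single pass over the fieldnames: for each category keep the best (lowest)
--     # candidate rank seen so far and the original fieldname that achieved it.
--     # '<=' so that a later fieldname with the same normalized form overrides an
--     # earlier one (last duplicate wins, as with a dict comprehension).
--     best = [(len(cands), "") for cands in _CATEGORIES]
--     for fn in fieldnames or []:
--         norm = (fn or "").strip().lower()
--         for i, cands in enumerate(_CATEGORIES):
--             if norm in cands:
--                 rank = cands.index(norm)
--                 if rank <= best[i][0]:
--                     best[i] = (rank, fn)
--     return (best[0][1], best[1][1], best[2][1])
-- ===== Notes on version B (the rewrite author's own statement) =====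
-- stated objective: alternative
-- what changed: Replaces A's precomputed normalized->original dict plus per-candidate lookup loop by a single pass over the fieldnames that keeps, per category, the lowest-ranked matching candidate (later equal matches overriding, reproducing dict-overwrite semantics).
import Mathlib
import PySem

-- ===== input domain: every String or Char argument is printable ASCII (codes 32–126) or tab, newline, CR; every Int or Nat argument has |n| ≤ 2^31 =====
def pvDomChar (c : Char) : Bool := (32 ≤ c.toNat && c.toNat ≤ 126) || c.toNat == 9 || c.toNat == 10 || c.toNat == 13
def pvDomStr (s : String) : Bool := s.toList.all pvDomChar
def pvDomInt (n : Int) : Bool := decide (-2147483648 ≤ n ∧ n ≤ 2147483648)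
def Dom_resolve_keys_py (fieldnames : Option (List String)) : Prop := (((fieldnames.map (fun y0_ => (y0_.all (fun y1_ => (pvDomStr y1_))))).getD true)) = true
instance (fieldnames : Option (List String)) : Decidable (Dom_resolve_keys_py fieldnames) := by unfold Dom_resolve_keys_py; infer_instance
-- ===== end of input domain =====

-- B replaces A's precomputed normalized->original dict + per-candidate lookup loop by a single
-- pass over the fieldnames keeping, per category, the lowest-ranked match (objective: alternative).


-- normalization applied in both Pythons: (fn or "").strip().lower()
def pvNorm (fn : String) : String :=
  PySem.Str.lower (PySem.Str.strip (if fn = "" then "" else fn))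

-- ===== PORT A =====
-- fset = {(fn or "").strip().lower(): fn for fn in (fieldnames or [])}
def pvFset (fieldnames : Option (List String)) : PySem.Dict String String :=
  (fieldnames.getD []).foldl (fun d fn => d.insert (pvNorm fn) fn) PySem.Dict.empty

-- def pick(candidates): for c in candidates: if c in fset: return fset[c];  return ""
def pvPickA (fset : PySem.Dict String String) : List String → String
  | [] => ""
  | c :: rest => if fset.contains c then (fset.get? c).getD "" else pvPickA fset rest

def resolve_keys_py (fieldnames : Option (List String)) : String × String × String :=
  let fset := pvFset fieldnames
  (pvPickA fset ["bvdid", "hojin_id", "id"],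
   pvPickA fset ["name", "company_name", "company"],
   pvPickA fset ["url", "website", "homepage", "home_page"])

-- ===== PORT B =====
-- the inner 'if norm in cands: rank = cands.index(norm); if rank <= best: best = (rank, fn)';
-- 'norm in cands' + 'cands.index(norm)' are ported together via PySem.List.index? (some ↔ member)
def pvStepCat (cands : List String) (st : Nat × String) (fn norm : String) : Nat × String :=
  match PySem.List.index? cands norm with
  | some rank => if rank ≤ st.1 then (rank, fn) else st
  | none => st

def resolve_keys_py_alt (fieldnames : Option (List String)) : String × String × String :=
  -- best = [(len(cands), "") for cands in _CATEGORIES]; one pass over the fieldnames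
  let best := (fieldnames.getD []).foldl
    (fun (b : (Nat × String) × (Nat × String) × (Nat × String)) fn =>
      let norm := pvNorm fn
      (pvStepCat ["bvdid", "hojin_id", "id"] b.1 fn norm,
       pvStepCat ["name", "company_name", "company"] b.2.1 fn norm,
       pvStepCat ["url", "website", "homepage", "home_page"] b.2.2 fn norm))
    ((3, ""), (3, ""), (4, ""))
  (best.1.2, best.2.1.2, best.2.2.2)

-- ===== PRECONDITION & SPEC =====
def Spec_resolve_keys_py (fieldnames : Option (List String)) (out : String × String × String) : Prop := out = resolve_keys_py_alt fieldnames
instance (fieldnames : Option (List String)) (out : String × String × String) : Decidable (Spec_resolve_keys_py fieldnames out) := by unfold Spec_resolve_keys_py; infer_instance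

-- ===== CLAIM (what is proved, stated in full; the proofs are below) =====
def Claim_equal_resolve_keys_py : Prop := ∀ (fieldnames : Option (List String)), Dom_resolve_keys_py fieldnames → Spec_resolve_keys_py fieldnames (resolve_keys_py fieldnames)

-- ===== LEMMAS AND PROOFS =====

-- proof-side characterization shared by both sides: last fn normalizing to c, first matching candidate
def pvLastMatch (fns : List String) (c : String) : Option String :=
  fns.foldl (fun acc fn => if pvNorm fn = c then some fn else acc) none

def pvPickB (fns : List String) : List String → String
  | [] => ""
  | c :: rest =>
    match pvLastMatch fns c with
    | some fn => fn
    | none => pvPickB fns rest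

-- (index of first candidate with a match — or the list length — , pvPickB's value)
def pvSpecPair (fns : List String) : List String → Nat × String
  | [] => (0, "")
  | c :: rest =>
    match pvLastMatch fns c with
    | some fn => (0, fn)
    | none => ((pvSpecPair fns rest).1 + 1, (pvSpecPair fns rest).2)

-- ---- A-side: dict lookup = last-match scan, pvPickA = pvPickB ----
theorem pv_get?_foldl (l : List String) (d : PySem.Dict String String) (c : String) :
    (l.foldl (fun d fn => d.insert (pvNorm fn) fn) d).get? c
      = l.foldl (fun acc fn => if pvNorm fn = c then some fn else acc) (d.get? c) := by
  induction l generalizing d with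
  | nil => rfl
  | cons fn rest ih =>
    simp only [List.foldl_cons]
    rw [ih]
    have hg : (d.insert (pvNorm fn) fn).get? c = if pvNorm fn = c then some fn else d.get? c := by
      rw [PySem.Dict.get?_insert]
      by_cases h : pvNorm fn = c
      · rw [if_pos h.symm, if_pos h]
      · rw [if_neg (fun hc => h hc.symm), if_neg h]
    rw [hg]

theorem pv_get?_fset (fieldnames : Option (List String)) (c : String) :
    (pvFset fieldnames).get? c = pvLastMatch (fieldnames.getD []) c := by
  unfold pvFset pvLastMatch
  rw [pv_get?_foldl]
  rfl

theorem pv_pickA_eq (fieldnames : Option (List String)) (cs : List String) :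
    pvPickA (pvFset fieldnames) cs = pvPickB (fieldnames.getD []) cs := by
  induction cs with
  | nil => rfl
  | cons c rest ih =>
    simp only [pvPickA, pvPickB]
    rw [PySem.Dict.contains_eq_isSome_get?, pv_get?_fset]
    cases h : pvLastMatch (fieldnames.getD []) c with
    | none => simpa [h] using ih
    | some fn => rfl

-- ---- B-side: the rank-minimizing fold computes pvSpecPair ----
theorem pv_lastMatch_append (fns : List String) (fn c : String) :
    pvLastMatch (fns ++ [fn]) c = if pvNorm fn = c then some fn else pvLastMatch fns c := by
  unfold pvLastMatch
  rw [List.foldl_append]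
  simp only [List.foldl_cons, List.foldl_nil]

theorem pv_step_spec (fns : List String) (fn : String) (cands : List String) :
    pvStepCat cands (pvSpecPair fns cands) fn (pvNorm fn) = pvSpecPair (fns ++ [fn]) cands := by
  induction cands with
  | nil => rfl
  | cons c rest ih =>
    by_cases h : pvNorm fn = c
    · have hidx : PySem.List.index? (c :: rest) (pvNorm fn) = some 0 := by
        rw [h]; exact PySem.List.index?_cons_self c rest
      have hrhs : pvSpecPair (fns ++ [fn]) (c :: rest) = (0, fn) := by
        simp only [pvSpecPair, pv_lastMatch_append, if_pos h]
      rw [hrhs]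
      simp only [pvStepCat, hidx]
      rw [if_pos (Nat.zero_le _)]
    · have hidx : PySem.List.index? (c :: rest) (pvNorm fn)
          = (PySem.List.index? rest (pvNorm fn)).map (· + 1) :=
        PySem.List.index?_cons_of_ne rest (Ne.symm h)
      have hlm2 : pvLastMatch (fns ++ [fn]) c = pvLastMatch fns c := by
        rw [pv_lastMatch_append, if_neg h]
      cases hlm : pvLastMatch fns c with
      | some v =>
        have hL : pvSpecPair fns (c :: rest) = (0, v) := by
          simp only [pvSpecPair, hlm]
        have hR : pvSpecPair (fns ++ [fn]) (c :: rest) = (0, v) := by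
          simp only [pvSpecPair, hlm2, hlm]
        rw [hL, hR]
        simp only [pvStepCat, hidx]
        cases hr : PySem.List.index? rest (pvNorm fn) with
        | none => rfl
        | some j =>
          simp only [Option.map_some]
          rw [if_neg (by omega)]
      | none =>
        have hL : pvSpecPair fns (c :: rest)
            = ((pvSpecPair fns rest).1 + 1, (pvSpecPair fns rest).2) := by
          simp only [pvSpecPair, hlm]
        have hR : pvSpecPair (fns ++ [fn]) (c :: rest)
            = ((pvSpecPair (fns ++ [fn]) rest).1 + 1, (pvSpecPair (fns ++ [fn]) rest).2) := by
          simp only [pvSpecPair, hlm2, hlm]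
        rw [hL, hR, ← ih]
        simp only [pvStepCat, hidx]
        cases hr : PySem.List.index? rest (pvNorm fn) with
        | none => rfl
        | some j =>
          simp only [Option.map_some]
          by_cases hj : j ≤ (pvSpecPair fns rest).1
          · rw [if_pos hj, if_pos (by omega)]
          · rw [if_neg hj, if_neg (by omega)]

theorem pv_fold_spec (cands : List String) (fns : List String) :
    fns.foldl (fun st fn => pvStepCat cands st fn (pvNorm fn)) (pvSpecPair [] cands)
      = pvSpecPair fns cands := by
  induction fns using List.reverseRecOn with
  | nil => rfl
  | append_singleton l fn ih =>
    rw [List.foldl_append, List.foldl_cons, List.foldl_nil, ih, pv_step_spec]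

theorem pv_specPair_snd (fns : List String) (cands : List String) :
    (pvSpecPair fns cands).2 = pvPickB fns cands := by
  induction cands with
  | nil => rfl
  | cons c rest ih =>
    simp only [pvSpecPair, pvPickB]
    cases pvLastMatch fns c with
    | some fn => rfl
    | none => exact ih

theorem pv_fold_prod3 (c1 c2 c3 : List String) (l : List String)
    (x y z : Nat × String) :
    l.foldl (fun (b : (Nat × String) × (Nat × String) × (Nat × String)) fn =>
        (pvStepCat c1 b.1 fn (pvNorm fn), pvStepCat c2 b.2.1 fn (pvNorm fn),
         pvStepCat c3 b.2.2 fn (pvNorm fn))) (x, y, z)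
      = (l.foldl (fun st fn => pvStepCat c1 st fn (pvNorm fn)) x,
         l.foldl (fun st fn => pvStepCat c2 st fn (pvNorm fn)) y,
         l.foldl (fun st fn => pvStepCat c3 st fn (pvNorm fn)) z) := by
  induction l generalizing x y z with
  | nil => rfl
  | cons d rest ih => simp only [List.foldl_cons, ih]

-- ===== VERDICT (by name: the statement is the Claim_ definition above) =====
theorem resolve_keys_py_spec : Claim_equal_resolve_keys_py := by
  intro fieldnames _
  simp only [Spec_resolve_keys_py, resolve_keys_py, resolve_keys_py_alt]
  rw [pv_fold_prod3]
  have h1 := pv_fold_spec ["bvdid", "hojin_id", "id"] (fieldnames.getD [])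
  have h2 := pv_fold_spec ["name", "company_name", "company"] (fieldnames.getD [])
  have h3 := pv_fold_spec ["url", "website", "homepage", "home_page"] (fieldnames.getD [])
  simp only [show pvSpecPair [] ["bvdid", "hojin_id", "id"] = (3, "") from rfl,
    show pvSpecPair [] ["name", "company_name", "company"] = (3, "") from rfl,
    show pvSpecPair [] ["url", "website", "homepage", "home_page"] = (4, "") from rfl] at h1 h2 h3
  simp only [h1, h2, h3, pv_specPair_snd, pv_pickA_eq]
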